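-- pv_equiv track=rewrite | github.com/ornelliahouedan/Cryptographie | encrypt.py | cle_cryptage
-- ===== SOURCE A (Python) =====
-- def cle_cryptage(texte,cle):
--     cle_chiffrement=''
--     i = 0
--     for caractere in texte:     # pour chaque caractère contenu dans le texte
--         if caractere.isalpha():  # si le caractère est une lettre de l'alphabet
--             cle_chiffrement += cle[i % len(cle)]
--             i +=1
--         else:
--             cle_chiffrement += ' '
--     return cle_chiffrement
-- ===== SOURCE B (Python) =====
-- def cle_cryptage(texte, cle):
--     # Two independent passes: first a prefix-sum table ranks (ranks[k] = number
--     # of alphabetic characters strictly before position k), then a stateless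
--     # join that reads the key index straight out of the table.
--     ranks = [0]
--     for c in texte:
--         ranks.append(ranks[-1] + c.isalpha())
--     return ''.join(
--         cle[ranks[k] % len(cle)] if c.isalpha() else ' '
--         for k, c in enumerate(texte)
--     )
-- ===== Notes on version B (the rewrite author's own statement) =====
-- stated objective: alternative
-- what changed: Replaces A's single accumulating loop with an in-loop key counter by two independent passes: a prefix-sum table of alphabetic-character counts, then a stateless join over enumerate that indexes the key by the table entry.
import Mathlib
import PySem

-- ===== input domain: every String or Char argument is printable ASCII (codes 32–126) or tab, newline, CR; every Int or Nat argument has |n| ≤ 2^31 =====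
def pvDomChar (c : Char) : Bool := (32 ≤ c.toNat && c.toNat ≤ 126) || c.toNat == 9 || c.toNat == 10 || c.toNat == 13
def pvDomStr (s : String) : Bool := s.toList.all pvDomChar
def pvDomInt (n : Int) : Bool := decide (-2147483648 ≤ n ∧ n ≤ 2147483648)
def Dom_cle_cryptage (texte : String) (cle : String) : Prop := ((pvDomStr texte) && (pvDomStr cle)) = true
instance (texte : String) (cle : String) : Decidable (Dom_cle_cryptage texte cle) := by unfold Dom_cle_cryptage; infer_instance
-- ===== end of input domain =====

-- B replaces A's accumulating loop with two passes: a prefix-sum table of alphabetic counts, then a stateless join indexing the key by the table; alternative decomposition, not faster.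


-- ===== PORT A =====
-- the for-loop of A: state (acc = cle_chiffrement, i); cle[i % len(cle)] is ported
-- with PySem.Int.mod / PySem.List.pyGetD (the default is unreachable under Pre_).
def cleAuxA (cle : List Char) : List Char → List Char → Int → List Char
  | [], acc, _ => acc
  | c :: rest, acc, i =>
    if PySem.Chars.isalpha c then
      cleAuxA cle rest (acc ++ [PySem.List.pyGetD cle (PySem.Int.mod i (cle.length : Int)) ' ']) (i + 1)
    else
      cleAuxA cle rest (acc ++ [' ']) i

def cle_cryptage (texte : String) (cle : String) : String :=
  String.mk (cleAuxA cle.toList texte.toList [] 0)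

-- ===== PORT B =====
-- the prefix-sum pass: ranks = [0]; for c in texte: ranks.append(ranks[-1] + c.isalpha())
def pvRanks (texte : List Char) : List Int :=
  texte.foldl
    (fun r c => r ++ [PySem.List.pyGetD r (-1) 0 + (if PySem.Chars.isalpha c then 1 else 0)])
    [0]

-- the generator 'cle[ranks[k] % len(cle)] if c.isalpha() else " " for k, c in enumerate(texte)'
def cleAuxB (ranks : List Int) (cle : List Char) : Nat → List Char → List Char
  | _, [] => []
  | k, c :: rest =>
    (if PySem.Chars.isalpha c then
       PySem.List.pyGetD cle (PySem.Int.mod (PySem.List.pyGetD ranks (k : Int) 0) (cle.length : Int)) ' '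
     else ' ') :: cleAuxB ranks cle (k + 1) rest

def cle_cryptage_alt (texte : String) (cle : String) : String :=
  String.mk (cleAuxB (pvRanks texte.toList) cle.toList 0 texte.toList)

-- ===== PRECONDITION & SPEC =====
-- Pre_ excludes exactly the inputs where Python A raises ZeroDivisionError:
-- an empty key together with at least one alphabetic character in texte.
def Pre_cle_cryptage (texte : String) (cle : String) : Prop :=
  cle = "" → texte.toList.all (fun c => !PySem.Chars.isalpha c) = true
instance (texte : String) (cle : String) : Decidable (Pre_cle_cryptage texte cle) := by
  unfold Pre_cle_cryptage; infer_instance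

def pvWitness_cle_cryptage : String × String := ("Hello, World!", "key")

def Spec_cle_cryptage (texte : String) (cle : String) (out : String) : Prop := out = cle_cryptage_alt texte cle
instance (texte : String) (cle : String) (out : String) : Decidable (Spec_cle_cryptage texte cle out) := by unfold Spec_cle_cryptage; infer_instance

-- ===== CLAIM (what is proved, stated in full; the proofs are below) =====
def Claim_equal_cle_cryptage : Prop := ∀ (texte : String) (cle : String), Dom_cle_cryptage texte cle → Pre_cle_cryptage texte cle → Spec_cle_cryptage texte cle (cle_cryptage texte cle)

-- ===== LEMMAS AND PROOFS =====

-- the abstract count of alphabetic chars before position k (proof-side only)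
def pvRank (texte : List Char) (k : Nat) : Int :=
  (texte.take k).foldl (fun a d => if PySem.Chars.isalpha d then a + 1 else a) 0

lemma pvRank_append (ts : List Char) (rest : List Char) :
    pvRank (ts ++ rest) ts.length = ts.foldl (fun a d => if PySem.Chars.isalpha d then a + 1 else a) 0 := by
  simp [pvRank]

lemma pvRanks_eq (ts : List Char) :
    pvRanks ts = (List.range (ts.length + 1)).map (fun k => pvRank ts k) := by
  induction ts using List.reverseRecOn with
  | nil => simp [pvRanks, pvRank]
  | append_singleton ts c ih =>
    have hstep : pvRanks (ts ++ [c]) =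
        pvRanks ts ++ [PySem.List.pyGetD (pvRanks ts) (-1) 0 + (if PySem.Chars.isalpha c then 1 else 0)] := by
      simp [pvRanks, List.foldl_append]
    have hlast : PySem.List.pyGetD (pvRanks ts) (-1) 0 = pvRank ts ts.length := by
      rw [ih, List.range_succ, List.map_append]
      simp [PySem.List.pyGetD_neg_one_append_singleton]
    have htake : ∀ k : Nat, k < ts.length + 1 → pvRank (ts ++ [c]) k = pvRank ts k := by
      intro k hk
      unfold pvRank
      rw [List.take_append_of_le_length (by omega)]
    have hfull : pvRank (ts ++ [c]) (ts.length + 1) = pvRank ts ts.length + (if PySem.Chars.isalpha c then 1 else 0) := by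
      unfold pvRank
      rw [show ts.length + 1 = (ts ++ [c]).length by simp, List.take_length, List.take_length,
        List.foldl_append]
      by_cases h : PySem.Chars.isalpha c <;> simp [h]
    rw [hstep, hlast, ih]
    rw [show (ts ++ [c]).length + 1 = (ts.length + 1) + 1 by simp]
    conv_rhs => rw [List.range_succ, List.map_append]
    congr 1
    · exact (List.map_congr_left fun k hk => htake k (List.mem_range.mp hk)).symm
    · simp [hfull]

lemma ranks_getD (ts : List Char) (k : Nat) (hk : k ≤ ts.length) :
    PySem.List.pyGetD (pvRanks ts) (k : Int) 0 = pvRank ts k := by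
  rw [pvRanks_eq, PySem.List.pyGetD_natCast]
  rw [List.getD_eq_getElem?_getD, List.getElem?_map, List.getElem?_range (by omega)]
  simp

lemma cleAux_main (cle : List Char) :
    ∀ (rest pre acc : List Char),
      cleAuxA cle rest acc (pvRank (pre ++ rest) pre.length) =
        acc ++ cleAuxB (pvRanks (pre ++ rest)) cle pre.length rest := by
  intro rest
  induction rest with
  | nil => intro pre acc; simp [cleAuxA, cleAuxB]
  | cons c rest ih =>
    intro pre acc
    have hsplit : pre ++ c :: rest = (pre ++ [c]) ++ rest := by simp
    have hlook : PySem.List.pyGetD (pvRanks (pre ++ c :: rest)) ((pre.length : Nat) : Int) 0 =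
        pvRank (pre ++ c :: rest) pre.length :=
      ranks_getD _ _ (by simp)
    by_cases h : PySem.Chars.isalpha c = true
    · have hr : pvRank ((pre ++ [c]) ++ rest) (pre ++ [c]).length =
          pvRank (pre ++ c :: rest) pre.length + 1 := by
        rw [pvRank_append, pvRank_append (rest := c :: rest)]
        simp [List.foldl_append, h]
      have := ih (pre ++ [c]) (acc ++ [PySem.List.pyGetD cle (PySem.Int.mod (pvRank (pre ++ c :: rest) pre.length) (cle.length : Int)) ' '])
      rw [hr, ← hsplit] at this
      simp only [cleAuxA, cleAuxB, h, if_pos, hlook]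
      rw [this]
      simp
    · have hr : pvRank ((pre ++ [c]) ++ rest) (pre ++ [c]).length =
          pvRank (pre ++ c :: rest) pre.length := by
        rw [pvRank_append, pvRank_append (rest := c :: rest)]
        simp [List.foldl_append, h]
      have := ih (pre ++ [c]) (acc ++ [' '])
      rw [hr, ← hsplit] at this
      simp only [cleAuxA, cleAuxB, h, Bool.false_eq_true, if_false]
      rw [this]
      simp

-- ===== VERDICT (by name: the statement is the Claim_ definition above) =====
theorem cle_cryptage_spec : Claim_equal_cle_cryptage := by
  intro texte cle _ _
  unfold Spec_cle_cryptage cle_cryptage cle_cryptage_alt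
  have h := cleAux_main cle.toList texte.toList [] []
  simp only [List.nil_append, List.length_nil] at h
  rw [show pvRank texte.toList 0 = 0 from by simp [pvRank]] at h
  rw [h]
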